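-- pv_equiv track=rewrite | github.com/Dongfeng-He/ctr2 | test_xgb.py | get_detail_invite_num
-- ===== SOURCE A (Python) =====
-- def get_detail_invite_num(invite_answer_days):
--     invite_num_1, invite_num_2, invite_num_3, invite_num_4, invite_num_5, invite_num_6 = 0, 0, 0, 0, 0, 0
--     for day in invite_answer_days:
--         relative_day = day - 3838
--         if 0 <= relative_day < 5:
--             invite_num_1 += 1
--         elif 5 <= relative_day < 10:
--             invite_num_2 += 1
--         elif 10 <= relative_day < 15:
--             invite_num_3 += 1
--         elif 15 <= relative_day < 20:
--             invite_num_4 += 1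
--         elif 20 <= relative_day < 25:
--             invite_num_5 += 1
--         else:
--             invite_num_6 += 1
--     return invite_num_1, invite_num_2, invite_num_3, invite_num_4, invite_num_5, invite_num_6
-- ===== SOURCE B (Python) =====
-- def get_detail_invite_num(invite_answer_days):
--     s = sorted(invite_answer_days)
--
--     def lower(x):
--         # index of the first element >= x in the sorted list s (hand-written lower bound)
--         lo, hi = 0, len(s)
--         while lo < hi:
--             mid = (lo + hi) // 2
--             if s[mid] < x:
--                 lo = mid + 1
--             else:
--                 hi = mid
--         return lo
--
--     b0, b1, b2, b3, b4, b5 = (lower(3838), lower(3843), lower(3848),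
--                               lower(3853), lower(3858), lower(3863))
--     return (b1 - b0, b2 - b1, b3 - b2, b4 - b3, b5 - b4, len(s) - (b5 - b0))
-- ===== Notes on version B (the rewrite author's own statement) =====
-- stated objective: alternative
-- what changed: Instead of bucketing each element through a six-way comparison chain, B sorts the list once and locates the five bucket boundaries 3838,3843,...,3863 with a hand-written binary-search lower bound; each bucket count is the difference of two boundary positions and the catch-all bucket is len minus the in-range span.
import Mathlib
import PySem

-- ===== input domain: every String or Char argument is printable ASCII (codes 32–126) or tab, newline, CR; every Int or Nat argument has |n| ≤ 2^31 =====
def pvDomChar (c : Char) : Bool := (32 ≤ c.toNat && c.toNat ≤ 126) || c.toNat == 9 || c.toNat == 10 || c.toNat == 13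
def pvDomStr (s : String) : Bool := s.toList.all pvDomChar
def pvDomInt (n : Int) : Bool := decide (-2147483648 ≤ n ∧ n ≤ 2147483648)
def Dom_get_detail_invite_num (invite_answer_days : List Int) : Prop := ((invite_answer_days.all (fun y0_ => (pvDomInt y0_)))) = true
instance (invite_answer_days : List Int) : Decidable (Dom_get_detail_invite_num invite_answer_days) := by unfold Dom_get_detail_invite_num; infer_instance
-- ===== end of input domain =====

-- B sorts the list once and finds the five bucket boundaries by a hand-written
-- binary-search lower bound; counts are differences of boundary positions
-- (objective: alternative algorithm, not claimed faster).


-- ===== PORT A =====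
-- A's for-loop over six scalar counters, as a foldl over the 6-tuple state.
def get_detail_invite_num (invite_answer_days : List Int) : Int × Int × Int × Int × Int × Int :=
  invite_answer_days.foldl
    (fun (s : Int × Int × Int × Int × Int × Int) (day : Int) =>
      let (n1, n2, n3, n4, n5, n6) := s
      let relative_day := day - 3838
      if 0 ≤ relative_day ∧ relative_day < 5 then (n1 + 1, n2, n3, n4, n5, n6)
      else if 5 ≤ relative_day ∧ relative_day < 10 then (n1, n2 + 1, n3, n4, n5, n6)
      else if 10 ≤ relative_day ∧ relative_day < 15 then (n1, n2, n3 + 1, n4, n5, n6)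
      else if 15 ≤ relative_day ∧ relative_day < 20 then (n1, n2, n3, n4 + 1, n5, n6)
      else if 20 ≤ relative_day ∧ relative_day < 25 then (n1, n2, n3, n4, n5 + 1, n6)
      else (n1, n2, n3, n4, n5, n6 + 1))
    (0, 0, 0, 0, 0, 0)

-- ===== PORT B =====
-- B's inner 'lower': while lo < hi: mid = (lo+hi)//2; if s[mid] < x: lo = mid+1 else hi = mid.
-- 's[mid]' is PySem.List.pyGet?; mid is always in range (0 ≤ lo ≤ mid < hi ≤ len s at every
-- call that reads it), so the '.getD 0' default is never taken.
def pvLower (s : List Int) (x : Int) (lo hi : Int) : Int :=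
  if h : lo < hi then
    let mid := PySem.Int.floordiv (lo + hi) 2
    if (PySem.List.pyGet? s mid).getD 0 < x then pvLower s x (mid + 1) hi
    else pvLower s x lo mid
  else lo
termination_by (hi - lo).toNat
decreasing_by
  all_goals
    simp only [PySem.Int.floordiv_eq_ediv_of_pos (by norm_num : (0:Int) < 2)]
    omega

def get_detail_invite_num_alt (invite_answer_days : List Int) : Int × Int × Int × Int × Int × Int :=
  let s := PySem.List.sorted invite_answer_days (fun v => v) false
  let b0 := pvLower s 3838 0 (s.length : Int)
  let b1 := pvLower s 3843 0 (s.length : Int)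
  let b2 := pvLower s 3848 0 (s.length : Int)
  let b3 := pvLower s 3853 0 (s.length : Int)
  let b4 := pvLower s 3858 0 (s.length : Int)
  let b5 := pvLower s 3863 0 (s.length : Int)
  (b1 - b0, b2 - b1, b3 - b2, b4 - b3, b5 - b4, (s.length : Int) - (b5 - b0))

-- ===== PRECONDITION & SPEC =====
def Spec_get_detail_invite_num (invite_answer_days : List Int) (out : Int × Int × Int × Int × Int × Int) : Prop := out = get_detail_invite_num_alt invite_answer_days
instance (invite_answer_days : List Int) (out : Int × Int × Int × Int × Int × Int) : Decidable (Spec_get_detail_invite_num invite_answer_days out) := by unfold Spec_get_detail_invite_num; infer_instance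

-- ===== CLAIM (what is proved, stated in full; the proofs are below) =====
def Claim_equal_get_detail_invite_num : Prop := ∀ (invite_answer_days : List Int), Dom_get_detail_invite_num invite_answer_days → Spec_get_detail_invite_num invite_answer_days (get_detail_invite_num invite_answer_days)

-- ===== LEMMAS AND PROOFS =====

-- A sorted (Pairwise ≤) list is monotone under Nat-index getD.
theorem pvGetD_mono (s : List Int) (hs : s.Pairwise (· ≤ ·)) {i j : Nat}
    (hij : i ≤ j) (hj : j < s.length) : s.getD i 0 ≤ s.getD j 0 := by
  rcases Nat.lt_or_ge i j with hlt | hge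
  · have hi : i < s.length := lt_trans hlt hj
    rw [List.getD_eq_getElem s 0 hi, List.getD_eq_getElem s 0 hj]
    exact List.pairwise_iff_get.mp hs ⟨i, hi⟩ ⟨j, hj⟩ hlt
  · have : i = j := le_antisymm hij hge
    subst this; exact le_rfl

-- If the first r positions satisfy p and the rest do not, countP p = r.
theorem pvCountP_prefix (p : Int → Bool) : ∀ (s : List Int) (r : Nat), r ≤ s.length →
    (∀ i : Nat, i < r → p (s.getD i 0) = true) →
    (∀ i : Nat, r ≤ i → i < s.length → p (s.getD i 0) = false) →
    s.countP p = r := by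
  intro s
  induction s with
  | nil => intro r hr _ _; simpa using (Nat.le_zero.mp hr).symm
  | cons a t ih =>
    intro r hr hlo hhi
    cases r with
    | zero =>
      have ha : p a = false := hhi 0 (Nat.zero_le _) (by simp)
      have ht : t.countP p = 0 := by
        refine ih 0 (Nat.zero_le _) (by omega) ?_
        intro i _ hi
        exact hhi (i + 1) (Nat.zero_le _) (by simpa using Nat.succ_lt_succ hi)
      simp [List.countP_cons, ha, ht]
    | succ r' =>
      have ha : p a = true := hlo 0 (Nat.succ_pos _)
      have ht : t.countP p = r' := by
        refine ih r' (by simpa using hr) ?_ ?_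
        · intro i hi; exact hlo (i + 1) (Nat.succ_lt_succ hi)
        · intro i h1 h2
          exact hhi (i + 1) (Nat.succ_le_succ h1) (by simpa using Nat.succ_lt_succ h2)
      simp [List.countP_cons, ha, ht]

-- The binary-search loop returns the number of elements < x, given the loop invariant.
theorem pvLower_spec (s : List Int) (hs : s.Pairwise (· ≤ ·)) (x : Int) :
    ∀ (n : Nat) (lo hi : Int), (hi - lo).toNat ≤ n → 0 ≤ lo → lo ≤ hi → hi ≤ (s.length : Int) →
    (∀ i : Nat, i < lo.toNat → s.getD i 0 < x) →
    (∀ i : Nat, hi.toNat ≤ i → i < s.length → x ≤ s.getD i 0) →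
    pvLower s x lo hi = (s.countP (fun a => decide (a < x)) : Int) := by
  intro n
  induction n with
  | zero =>
    intro lo hi hfuel h0 hlh hhl hbelow habove
    have heq : hi = lo := by omega
    subst heq
    rw [pvLower, dif_neg (lt_irrefl hi)]
    have := pvCountP_prefix (fun a => decide (a < x)) s hi.toNat (by omega)
      (fun i hi' => by simpa using hbelow i hi')
      (fun i h1 h2 => by simpa using not_lt.mpr (habove i h1 h2))
    omega
  | succ n ih =>
    intro lo hi hfuel h0 hlh hhl hbelow habove
    by_cases h : lo < hi
    · rw [pvLower, dif_pos h]
      have hmid : lo ≤ PySem.Int.floordiv (lo + hi) 2 ∧ PySem.Int.floordiv (lo + hi) 2 < hi := by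
        rw [PySem.Int.floordiv_eq_ediv_of_pos (by norm_num : (0:Int) < 2)]
        omega
      set mid := PySem.Int.floordiv (lo + hi) 2 with hmiddef
      have hmR : mid < (s.length : Int) := lt_of_lt_of_le hmid.2 hhl
      have hm0 : 0 ≤ mid := le_trans h0 hmid.1
      have hmidNat : mid = (mid.toNat : Int) := by omega
      have hmlen : mid.toNat < s.length := by omega
      have hget : (PySem.List.pyGet? s mid).getD 0 = s.getD mid.toNat 0 := by
        obtain ⟨m, hm⟩ : ∃ m : Nat, mid = (m : Int) := ⟨mid.toNat, by omega⟩
        rw [hm, PySem.List.pyGet?_natCast]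
        simp [List.getD_eq_getElem?_getD]
      by_cases hx : (PySem.List.pyGet? s mid).getD 0 < x
      · rw [if_pos hx]
        refine ih (mid + 1) hi (by omega) (by omega) (by omega) hhl ?_ habove
        intro i hi'
        have hile : i ≤ mid.toNat := by omega
        have : s.getD i 0 ≤ s.getD mid.toNat 0 := pvGetD_mono s hs hile hmlen
        rw [hget] at hx
        omega
      · rw [if_neg hx]
        refine ih lo mid (by omega) h0 hmid.1 (le_of_lt hmR) hbelow ?_
        intro i h1 h2
        have : s.getD mid.toNat 0 ≤ s.getD i 0 := pvGetD_mono s hs h1 h2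
        rw [hget] at hx
        omega
    · have heq : hi = lo := by omega
      subst heq
      rw [pvLower, dif_neg (lt_irrefl hi)]
      have := pvCountP_prefix (fun a => decide (a < x)) s hi.toNat (by omega)
        (fun i hi' => by simpa using hbelow i hi')
        (fun i h1 h2 => by simpa using not_lt.mpr (habove i h1 h2))
      omega

-- pvLower over the whole sorted list counts the elements < x.
theorem pvLower_count (s : List Int) (hs : s.Pairwise (· ≤ ·)) (x : Int) :
    pvLower s x 0 (s.length : Int) = (s.countP (fun a => decide (a < x)) : Int) := by
  refine pvLower_spec s hs x (s.length) 0 (s.length : Int) (by omega) le_rfl (by omega) le_rfl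
    (fun i hi => by omega) (fun i h1 h2 => by omega)

-- Counting below u splits at lo into (below lo) + (in [lo, u)).
theorem pvCountP_split (lo u : Int) (h : lo ≤ u) : ∀ (l : List Int),
    l.countP (fun a => decide (a < u)) =
      l.countP (fun a => decide (a < lo)) + l.countP (fun a => decide (lo ≤ a ∧ a < u)) := by
  intro l
  induction l with
  | nil => simp
  | cons a t ih =>
    simp only [List.countP_cons, ih]
    by_cases h1 : a < lo
    · rw [if_pos (by simp; omega), if_pos (by simpa using h1), if_neg (by simp; omega)]
      omega
    · by_cases h2 : a < u
      · rw [if_pos (by simpa using h2), if_neg (by simpa using h1), if_pos (by simp; omega)]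
        omega
      · rw [if_neg (by simpa using h2), if_neg (by simpa using h1), if_neg (by simp; omega)]
        omega

-- A's fold accumulates the five bucket counts and the catch-all count.
theorem pvFoldA_count (l : List Int) : ∀ (a b c d e f : Int),
    l.foldl
      (fun (s : Int × Int × Int × Int × Int × Int) (day : Int) =>
        let (n1, n2, n3, n4, n5, n6) := s
        let relative_day := day - 3838
        if 0 ≤ relative_day ∧ relative_day < 5 then (n1 + 1, n2, n3, n4, n5, n6)
        else if 5 ≤ relative_day ∧ relative_day < 10 then (n1, n2 + 1, n3, n4, n5, n6)
        else if 10 ≤ relative_day ∧ relative_day < 15 then (n1, n2, n3 + 1, n4, n5, n6)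
        else if 15 ≤ relative_day ∧ relative_day < 20 then (n1, n2, n3, n4 + 1, n5, n6)
        else if 20 ≤ relative_day ∧ relative_day < 25 then (n1, n2, n3, n4, n5 + 1, n6)
        else (n1, n2, n3, n4, n5, n6 + 1))
      (a, b, c, d, e, f) =
    (a + (l.countP (fun v => decide (3838 ≤ v ∧ v < 3843)) : Int),
     b + (l.countP (fun v => decide (3843 ≤ v ∧ v < 3848)) : Int),
     c + (l.countP (fun v => decide (3848 ≤ v ∧ v < 3853)) : Int),
     d + (l.countP (fun v => decide (3853 ≤ v ∧ v < 3858)) : Int),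
     e + (l.countP (fun v => decide (3858 ≤ v ∧ v < 3863)) : Int),
     f + (l.countP (fun v => decide (¬(3838 ≤ v ∧ v < 3863))) : Int)) := by
  induction l with
  | nil => intro a b c d e f; simp
  | cons v t ih =>
    intro a b c d e f
    simp only [List.foldl_cons, List.countP_cons]
    by_cases h1 : 0 ≤ v - 3838 ∧ v - 3838 < 5
    · simp only [h1, if_true, ih]
      have : (decide (3838 ≤ v ∧ v < 3843), decide (3843 ≤ v ∧ v < 3848),
              decide (3848 ≤ v ∧ v < 3853), decide (3853 ≤ v ∧ v < 3858),
              decide (3858 ≤ v ∧ v < 3863), decide (¬(3838 ≤ v ∧ v < 3863)))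
            = (true, false, false, false, false, false) := by
        simp only [Prod.mk.injEq, decide_eq_true_eq, decide_eq_false_iff_not]; omega
      simp only [Prod.mk.injEq] at this
      simp [this.1, this.2.1, this.2.2.1, this.2.2.2.1, this.2.2.2.2.1, this.2.2.2.2.2]
      omega
    · by_cases h2 : 5 ≤ v - 3838 ∧ v - 3838 < 10
      · simp only [h1, h2, if_false, if_true, ih]
        have : (decide (3838 ≤ v ∧ v < 3843), decide (3843 ≤ v ∧ v < 3848),
                decide (3848 ≤ v ∧ v < 3853), decide (3853 ≤ v ∧ v < 3858),
                decide (3858 ≤ v ∧ v < 3863), decide (¬(3838 ≤ v ∧ v < 3863)))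
              = (false, true, false, false, false, false) := by
          simp only [Prod.mk.injEq, decide_eq_true_eq, decide_eq_false_iff_not]; omega
        simp only [Prod.mk.injEq] at this
        simp [this.1, this.2.1, this.2.2.1, this.2.2.2.1, this.2.2.2.2.1, this.2.2.2.2.2]
        omega
      · by_cases h3 : 10 ≤ v - 3838 ∧ v - 3838 < 15
        · simp only [h1, h2, h3, if_false, if_true, ih]
          have : (decide (3838 ≤ v ∧ v < 3843), decide (3843 ≤ v ∧ v < 3848),
                  decide (3848 ≤ v ∧ v < 3853), decide (3853 ≤ v ∧ v < 3858),
                  decide (3858 ≤ v ∧ v < 3863), decide (¬(3838 ≤ v ∧ v < 3863)))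
                = (false, false, true, false, false, false) := by
            simp only [Prod.mk.injEq, decide_eq_true_eq, decide_eq_false_iff_not]; omega
          simp only [Prod.mk.injEq] at this
          simp [this.1, this.2.1, this.2.2.1, this.2.2.2.1, this.2.2.2.2.1, this.2.2.2.2.2]
          omega
        · by_cases h4 : 15 ≤ v - 3838 ∧ v - 3838 < 20
          · simp only [h1, h2, h3, h4, if_false, if_true, ih]
            have : (decide (3838 ≤ v ∧ v < 3843), decide (3843 ≤ v ∧ v < 3848),
                    decide (3848 ≤ v ∧ v < 3853), decide (3853 ≤ v ∧ v < 3858),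
                    decide (3858 ≤ v ∧ v < 3863), decide (¬(3838 ≤ v ∧ v < 3863)))
                  = (false, false, false, true, false, false) := by
              simp only [Prod.mk.injEq, decide_eq_true_eq, decide_eq_false_iff_not]; omega
            simp only [Prod.mk.injEq] at this
            simp [this.1, this.2.1, this.2.2.1, this.2.2.2.1, this.2.2.2.2.1, this.2.2.2.2.2]
            omega
          · by_cases h5 : 20 ≤ v - 3838 ∧ v - 3838 < 25
            · simp only [h1, h2, h3, h4, h5, if_false, if_true, ih]
              have : (decide (3838 ≤ v ∧ v < 3843), decide (3843 ≤ v ∧ v < 3848),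
                      decide (3848 ≤ v ∧ v < 3853), decide (3853 ≤ v ∧ v < 3858),
                      decide (3858 ≤ v ∧ v < 3863), decide (¬(3838 ≤ v ∧ v < 3863)))
                    = (false, false, false, false, true, false) := by
                simp only [Prod.mk.injEq, decide_eq_true_eq, decide_eq_false_iff_not]; omega
              simp only [Prod.mk.injEq] at this
              simp [this.1, this.2.1, this.2.2.1, this.2.2.2.1, this.2.2.2.2.1, this.2.2.2.2.2]
              omega
            · simp only [h1, h2, h3, h4, h5, if_false, ih]
              have : (decide (3838 ≤ v ∧ v < 3843), decide (3843 ≤ v ∧ v < 3848),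
                      decide (3848 ≤ v ∧ v < 3853), decide (3853 ≤ v ∧ v < 3858),
                      decide (3858 ≤ v ∧ v < 3863), decide (¬(3838 ≤ v ∧ v < 3863)))
                    = (false, false, false, false, false, true) := by
                simp only [Prod.mk.injEq, decide_eq_true_eq, decide_eq_false_iff_not]; omega
              simp only [Prod.mk.injEq] at this
              simp [this.1, this.2.1, this.2.2.1, this.2.2.2.1, this.2.2.2.2.1, this.2.2.2.2.2]
              omega

-- ===== VERDICT (by name: the statement is the Claim_ definition above) =====
theorem get_detail_invite_num_spec : Claim_equal_get_detail_invite_num := by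
  intro l _
  unfold Spec_get_detail_invite_num
  have hs : (PySem.List.sorted l (fun v => v) false).Pairwise (· ≤ ·) :=
    PySem.List.sorted_pairwise l (fun v => v)
  have hperm : (PySem.List.sorted l (fun v => v) false).Perm l :=
    PySem.List.sorted_perm l (fun v => v) false
  have hcnt : ∀ p : Int → Bool, (PySem.List.sorted l (fun v => v) false).countP p = l.countP p :=
    fun p => hperm.countP_eq p
  have hlen : (PySem.List.sorted l (fun v => v) false).length = l.length := hperm.length_eq
  simp only [get_detail_invite_num, get_detail_invite_num_alt,
    pvLower_count (PySem.List.sorted l (fun v => v) false) hs]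
  simp only [hcnt, hlen]
  rw [pvFoldA_count]
  have e1 := pvCountP_split 3838 3843 (by norm_num) l
  have e2 := pvCountP_split 3843 3848 (by norm_num) l
  have e3 := pvCountP_split 3848 3853 (by norm_num) l
  have e4 := pvCountP_split 3853 3858 (by norm_num) l
  have e5 := pvCountP_split 3858 3863 (by norm_num) l
  have e6 := pvCountP_split 3838 3863 (by norm_num) l
  have etot := List.length_eq_countP_add_countP (fun v => decide (3838 ≤ v ∧ v < 3863)) (l := l)
  have enot : l.countP (fun a => decide ¬(fun v => decide (3838 ≤ v ∧ v < 3863)) a = true)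
      = l.countP (fun v => decide (¬(3838 ≤ v ∧ v < 3863))) := by
    congr 1
    funext v
    simp
  rw [enot] at etot
  simp only [Prod.mk.injEq]
  refine ⟨by omega, by omega, by omega, by omega, by omega, by omega⟩
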